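-- pv_equiv track=rewrite | github.com/barkdoll/100-algo | arrayConversion/array_conversion.py | array_conversion
-- ===== SOURCE A (Python) =====
-- from typing import List
-- from functools import reduce
--
-- def array_conversion(input_array: List[int]) -> int:
--
--     def product(factors: List[int]) -> int:
--         return reduce(lambda a, b: a * b, factors)
--
--     def alternate(bundle: List[int], iteration: int = 0) -> int:
--         if len(bundle) == 1:
--             return bundle[0]
--
--         processed = (
--             [
--                 sum([x, bundle[i+1]])
--                 for i, x in enumerate(bundle)
--                 if (i % 2 == 0)
--             ]
--             if iteration % 2 == 0 else
--             [
--                 product([x, bundle[i+1]])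
--                 for i, x in enumerate(bundle)
--                 if (i % 2 == 0)
--             ]
--         )
--
--         return alternate(processed, iteration+1)
--
--     return alternate(input_array)
-- ===== SOURCE B (Python) =====
-- def array_conversion(input_array):
--     def pairwise(xs, op):
--         if len(xs) < 2:
--             return []
--         return [op(xs[0], xs[1])] + pairwise(xs[2:], op)
--
--     arr = input_array
--     level = 0
--     while len(arr) > 1:
--         op = (lambda a, b: a + b) if level % 2 == 0 else (lambda a, b: a * b)
--         arr = pairwise(arr, op)
--         level += 1
--     return arr[0]
-- ===== Notes on version B (the rewrite author's own statement) =====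
-- stated objective: simpler
-- what changed: Replaces the recursive enumerate+filter+index comprehension with an iterative level loop over a direct structural pairwise-chunking helper (no index arithmetic, no enumerate, no filter).
import Mathlib
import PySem

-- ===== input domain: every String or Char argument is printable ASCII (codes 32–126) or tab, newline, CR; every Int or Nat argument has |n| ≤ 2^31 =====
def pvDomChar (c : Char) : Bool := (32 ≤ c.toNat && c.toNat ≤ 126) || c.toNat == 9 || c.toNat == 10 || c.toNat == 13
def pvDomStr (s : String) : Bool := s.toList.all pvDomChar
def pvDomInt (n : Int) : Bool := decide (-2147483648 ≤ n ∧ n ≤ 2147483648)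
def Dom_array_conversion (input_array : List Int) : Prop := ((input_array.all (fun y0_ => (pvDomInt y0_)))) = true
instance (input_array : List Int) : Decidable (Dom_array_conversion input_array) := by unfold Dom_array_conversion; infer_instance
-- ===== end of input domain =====

-- B replaces A's recursive enumerate+filter+index comprehension by an iterative level loop over a
-- structural pairwise-chunking helper (objective: simpler); return-value equivalence on power-of-two lengths.

-- ===== PORT A =====
-- product(factors) = reduce(lambda a, b: a * b, factors); A only calls it on two-element lists
def pvProductA (factors : List Int) : Int :=
  match factors with
  | f :: r => r.foldl (· * ·) f
  | [] => 0  -- reduce raises on []; never reached by A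

-- the comprehension [op(x, bundle[i+1]) for i, x in enumerate(bundle) if i % 2 == 0];
-- bundle[i+1] via pyGet?/getD 0: on an odd length Python raises IndexError there (excluded by Pre_)
def pvMapPairsA (bundle : List Int) (op : Int → Int → Int) : List Int :=
  ((PySem.List.enumerate bundle 0).filter (fun p => PySem.Int.mod p.1 2 == 0)).map
    (fun p => op p.2 ((PySem.List.pyGet? bundle (p.1 + 1)).getD 0))

-- fuel only makes the recursion total: each level halves the bundle, so length+1 levels always
-- suffice on Pre_ inputs; fuel 0 is unreachable there (on [] Python recurses forever)
def pvAlternateA : Nat → List Int → Int → Int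
  | 0, _, _ => 0
  | fuel + 1, bundle, iteration =>
    if bundle.length = 1 then (PySem.List.pyGet? bundle 0).getD 0
    else
      let processed :=
        if PySem.Int.mod iteration 2 == 0 then
          pvMapPairsA bundle (fun x y => ([x, y] : List Int).sum)
        else
          pvMapPairsA bundle (fun x y => pvProductA [x, y])
      pvAlternateA fuel processed (iteration + 1)

def array_conversion (input_array : List Int) : Int :=
  pvAlternateA (input_array.length + 1) input_array 0

-- ===== PORT B =====
def pvPairwiseB (op : Int → Int → Int) : List Int → List Int
  | a :: b :: rest => op a b :: pvPairwiseB op rest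
  | _ => []

-- the while loop, again total by the same fuel argument
def pvLoopB : Nat → List Int → Int → Int
  | 0, _, _ => 0
  | fuel + 1, arr, level =>
    if arr.length > 1 then
      pvLoopB fuel (pvPairwiseB (if PySem.Int.mod level 2 == 0 then (· + ·) else (· * ·)) arr) (level + 1)
    else (PySem.List.pyGet? arr 0).getD 0  -- arr[0]; raises only on [], outside Pre_

def array_conversion_alt (input_array : List Int) : Int :=
  pvLoopB (input_array.length + 1) input_array 0

-- ===== PRECONDITION & SPEC =====
-- Pre_: the length is a power of two — exactly where Python A returns: any other length reaches an
-- odd bundle of length > 1 where bundle[i+1] raises IndexError (and [] recurses forever).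
def Pre_array_conversion (input_array : List Int) : Prop :=
  ∃ k ≤ input_array.length, 2 ^ k = input_array.length
instance (input_array : List Int) : Decidable (Pre_array_conversion input_array) := by
  unfold Pre_array_conversion; infer_instance
def pvWitness_array_conversion : List Int := [1, 2, 3, 4]

def Spec_array_conversion (input_array : List Int) (out : Int) : Prop := out = array_conversion_alt input_array
instance (input_array : List Int) (out : Int) : Decidable (Spec_array_conversion input_array out) := by unfold Spec_array_conversion; infer_instance

-- ===== CLAIM (what is proved, stated in full; the proofs are below) =====
def Claim_equal_array_conversion : Prop := ∀ (input_array : List Int), Dom_array_conversion input_array → Pre_array_conversion input_array → Spec_array_conversion input_array (array_conversion input_array)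

-- ===== LEMMAS AND PROOFS =====
theorem enum_shift (xs : List Int) : ∀ (s : Int), PySem.List.enumerate xs (s + 2) = (PySem.List.enumerate xs s).map (fun p => (p.1 + 2, p.2)) := by
  induction xs with
  | nil => intro s; simp [PySem.List.enumerate]
  | cons a t ih =>
    intro s
    rw [PySem.List.enumerate_cons, PySem.List.enumerate_cons]
    simp only [List.map_cons]
    have : s + 2 + 1 = s + 1 + 2 := by ring
    rw [this, ih]

theorem stepA (xs : List Int) (a b : Int) (op : Int → Int → Int) :
    pvMapPairsA (a :: b :: xs) op = op a b :: pvMapPairsA xs op := by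
  unfold pvMapPairsA
  rw [PySem.List.enumerate_cons, PySem.List.enumerate_cons,
      show (0:Int)+1+1 = 0+2 by norm_num, enum_shift]
  rw [List.filter_cons, List.filter_cons]
  norm_num [show PySem.Int.mod 0 2 = 0 by decide, show PySem.Int.mod 1 2 = 1 by decide]
  rw [List.filter_map, List.map_map]
  have hpred : ((fun p : Int × Int => p.1 % 2 == 0) ∘ fun p : Int × Int => (p.1 + 2, p.2))
      = (fun p : Int × Int => p.1 % 2 == 0) := by
    funext p
    simp [Int.add_emod_right]
  rw [hpred]
  apply List.map_congr_left
  intro p hp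
  have hmem := List.mem_of_mem_filter hp
  rw [PySem.List.mem_enumerate_iff] at hmem
  obtain ⟨k, hk, rfl⟩ := hmem
  simp only [zero_add]
  have h1 : ((k : Int) + 2 + 1) = ((k + 3 : Nat) : Int) := by push_cast; ring
  have h2 : ((k : Int) + 1) = ((k + 1 : Nat) : Int) := by push_cast; ring
  simp only [Function.comp_apply]
  rw [h1, h2, PySem.List.pyGet?_natCast, PySem.List.pyGet?_natCast]
  simp

theorem pvPairwiseB_length (op : Int → Int → Int) (xs : List Int) :
    (pvPairwiseB op xs).length = xs.length / 2 := by
  fun_induction pvPairwiseB op xs with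
  | case1 a b rest ih => simp only [List.length_cons, ih]; omega
  | case2 x h =>
    cases x with
    | nil => simp
    | cons a t =>
      cases t with
      | nil => simp
      | cons b r => exact (h a b r rfl).elim

theorem mapPairs_eq_pairwise (op : Int → Int → Int) (xs : List Int) (h : 2 ∣ xs.length) :
    pvMapPairsA xs op = pvPairwiseB op xs := by
  fun_induction pvPairwiseB op xs with
  | case1 a b rest ih =>
    rw [stepA]
    simp only [List.length_cons] at h
    rw [ih (by omega)]
  | case2 x hx =>
    cases x with
    | nil => rfl
    | cons a t =>
      cases t with
      | nil => simp at h
      | cons b r => exact (hx a b r rfl).elim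

theorem sum2_eq : (fun x y => ([x, y] : List Int).sum) = (· + ·) := by
  funext x y; simp

theorem prod2_eq : (fun x y : Int => pvProductA [x, y]) = (· * ·) := by
  funext x y; simp [pvProductA]

theorem mainAB : ∀ (fuel k : Nat) (xs : List Int) (it : Int), xs.length = 2 ^ k → k < fuel →
    pvAlternateA fuel xs it = pvLoopB fuel xs it := by
  intro fuel
  induction fuel with
  | zero => intro k xs it _ hk; omega
  | succ fuel ih =>
    intro k xs it hlen hk
    cases k with
    | zero =>
      rw [pow_zero] at hlen
      rw [pvAlternateA, pvLoopB, if_pos hlen, if_neg (by omega)]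
    | succ j =>
      have h1 : 1 ≤ 2 ^ j := Nat.one_le_two_pow
      have hp : 2 ^ (j + 1) = 2 ^ j * 2 := pow_succ 2 j
      have h2 : 2 ≤ xs.length := by omega
      rw [pvAlternateA, pvLoopB]
      rw [if_neg (show ¬ xs.length = 1 by omega), if_pos (show xs.length > 1 by omega)]
      have hdvd' : 2 ∣ xs.length := by rw [hlen, hp]; exact Dvd.intro_left _ rfl
      have hhalf : xs.length / 2 = 2 ^ j := by omega
      by_cases hit : (PySem.Int.mod it 2 == 0) = true
      · simp only [if_pos hit]
        rw [sum2_eq, mapPairs_eq_pairwise _ _ hdvd']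
        exact ih j _ _ (by rw [pvPairwiseB_length, hhalf]) (by omega)
      · simp only [if_neg hit]
        rw [prod2_eq, mapPairs_eq_pairwise _ _ hdvd']
        exact ih j _ _ (by rw [pvPairwiseB_length, hhalf]) (by omega)

-- ===== VERDICT (by name: the statement is the Claim_ definition above) =====
theorem array_conversion_spec : Claim_equal_array_conversion := by
  intro xs _ hpre
  obtain ⟨k, _, hk⟩ := hpre
  unfold Spec_array_conversion array_conversion array_conversion_alt
  exact mainAB (xs.length + 1) k xs 0 hk.symm (by have := Nat.lt_two_pow_self (n := k); omega)
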